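-- pv_equiv track=rewrite | github.com/CollinJWhite/XMLtoExcelGUI | XML_to_Excel_GUI.py | get_unique_headers
-- ===== SOURCE A (Python) =====
-- def get_unique_headers(fullPaths):
--     #Convert full paths to shortest unique suffixes.
--     #For each path, find the shortest suffix that uniquely identifies it.
--     headers = {}  # maps original full path to final header name
--
--     for fullPath in fullPaths:
--         parts = fullPath.split('/')
--
--         # Try from shortest to longest suffix
--         for suffix_length in range(1, len(parts) + 1):
--             suffix = '/'.join(parts[-suffix_length:]) #joins last <suffix_length> elements of parts with slashes to create suffix
--
--             # Check if another path would also generate this same suffix at this length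
--             conflict = False
--             for otherPath in fullPaths:
--                 if otherPath == fullPath:
--                     continue
--                 otherParts = otherPath.split('/')
--                 if suffix_length <= len(otherParts):
--                     otherSuffix = '/'.join(otherParts[-suffix_length:])
--                     if otherSuffix == suffix:
--                         conflict = True
--                         break
--             if not conflict:
--                 headers[fullPath] = suffix
--                 break
--
--         # If no unique suffix found, use full path as fallback
--         if fullPath not in headers:
--             headers[fullPath] = fullPath
--     return headers
-- ===== SOURCE B (Python) =====
-- def get_unique_headers(fullPaths):
--     # Count every (length, suffix) pair once per distinct path, then pick each
--     # path's shortest suffix whose count is 1 (full path as fallback).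
--     distinct = list(dict.fromkeys(fullPaths))
--     counts = {}
--     for p in distinct:
--         parts = p.split('/')
--         for L in range(1, len(parts) + 1):
--             key = (L, '/'.join(parts[-L:]))
--             counts[key] = counts.get(key, 0) + 1
--     headers = {}
--     for p in distinct:
--         parts = p.split('/')
--         header = p  # fallback: full path
--         for L in range(1, len(parts) + 1):
--             suffix = '/'.join(parts[-L:])
--             if counts[(L, suffix)] == 1:
--                 header = suffix
--                 break
--         headers[p] = header
--     return headers
-- ===== Notes on version B (the rewrite author's own statement) =====
-- stated objective: faster
-- what changed: Replaces the per-path-per-length scan over all other paths with a (length, suffix) counter built once over the distinct paths, so each path just takes its first suffix whose count is 1.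
import Mathlib
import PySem

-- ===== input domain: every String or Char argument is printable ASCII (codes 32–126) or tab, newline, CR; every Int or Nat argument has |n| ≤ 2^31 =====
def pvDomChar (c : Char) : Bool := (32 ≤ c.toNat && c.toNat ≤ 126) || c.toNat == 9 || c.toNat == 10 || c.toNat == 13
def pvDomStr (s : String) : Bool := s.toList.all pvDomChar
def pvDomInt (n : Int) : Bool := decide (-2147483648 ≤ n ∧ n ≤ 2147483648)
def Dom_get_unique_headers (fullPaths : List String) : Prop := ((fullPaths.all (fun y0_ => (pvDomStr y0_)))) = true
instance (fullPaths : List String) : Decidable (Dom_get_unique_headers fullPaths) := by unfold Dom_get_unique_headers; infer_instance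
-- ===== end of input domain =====

-- B replaces A's per-path scan over all other paths by a (length, suffix) counter
-- built once, then picks each path's first suffix with count 1 (objective: faster).

-- shared helpers: both Pythons compute parts = path.split('/'), suffix = '/'.join(parts[-L:])
-- and iterate L over range(1, len(parts)+1) by exactly these expressions
def pvParts (s : String) : List String := (PySem.Str.split? s "/").getD []
def pvSuffix (parts : List String) (L : Int) : String :=
  PySem.Str.join "/" (PySem.List.slice parts (some (-L)) none)
def pvLens (parts : List String) : List Int := PySem.List.pyRange 1 ((parts.length : Int) + 1) 1

-- ===== PORT A =====
-- inner 'for otherPath in fullPaths: … break' loop (conflict flag)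
def pvConflict (paths : List String) (fullPath : String) (L : Int) (suffix : String) : Bool :=
  match paths with
  | [] => false
  | o :: rest =>
    if o == fullPath then pvConflict rest fullPath L suffix
    else
      let otherParts := pvParts o
      if L ≤ (otherParts.length : Int) then
        if pvSuffix otherParts L == suffix then true
        else pvConflict rest fullPath L suffix
      else pvConflict rest fullPath L suffix

-- 'for suffix_length in range(1, len(parts)+1): … break' loop; some = broke with that suffix
def pvFind (fullPaths : List String) (fullPath : String) (parts : List String) :
    List Int → Option String
  | [] => none
  | L :: rest =>
    let suffix := pvSuffix parts L
    if pvConflict fullPaths fullPath L suffix then pvFind fullPaths fullPath parts rest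
    else some suffix

-- body of A's outer 'for fullPath in fullPaths' loop
def pvAStep (fullPaths : List String) (headers : PySem.Dict String String)
    (fullPath : String) : PySem.Dict String String :=
  let parts := pvParts fullPath
  let headers :=
    match pvFind fullPaths fullPath parts (pvLens parts) with
    | some suffix => headers.insert fullPath suffix
    | none => headers
  if headers.contains fullPath then headers else headers.insert fullPath fullPath

def get_unique_headers (fullPaths : List String) : List (String × String) :=
  (fullPaths.foldl (pvAStep fullPaths) PySem.Dict.empty).items

-- ===== PORT B =====
-- counts[(L, '/'.join(parts[-L:]))] = counts.get(key, 0) + 1 over the distinct paths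
def pvCounts (distinct : List String) : PySem.Dict (Int × String) Int :=
  distinct.foldl (fun d q =>
    let parts := pvParts q
    (pvLens parts).foldl (fun d L => d.modify (L, pvSuffix parts L) 0 (· + 1)) d)
    PySem.Dict.empty

-- 'header = p; for L in …: if counts[…] == 1: header = suffix; break'
def pvPick (counts : PySem.Dict (Int × String) Int) (parts : List String) (p : String) :
    List Int → String
  | [] => p
  | L :: rest =>
    let suffix := pvSuffix parts L
    if counts.getD (L, suffix) 0 == 1 then suffix else pvPick counts parts p rest

def get_unique_headers_alt (fullPaths : List String) : List (String × String) :=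
  let distinct := PySem.List.dedup fullPaths
  let counts := pvCounts distinct
  (distinct.foldl (fun h p =>
    h.insert p (pvPick counts (pvParts p) p (pvLens (pvParts p)))) PySem.Dict.empty).items

-- ===== PRECONDITION & SPEC =====
def Spec_get_unique_headers (fullPaths : List String) (out : List (String × String)) : Prop := out = get_unique_headers_alt fullPaths
instance (fullPaths : List String) (out : List (String × String)) : Decidable (Spec_get_unique_headers fullPaths out) := by unfold Spec_get_unique_headers; infer_instance

-- ===== CLAIM (what is proved, stated in full; the proofs are below) =====
def Claim_equal_get_unique_headers : Prop := ∀ (fullPaths : List String), Dom_get_unique_headers fullPaths → Spec_get_unique_headers fullPaths (get_unique_headers fullPaths)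

-- ===== LEMMAS AND PROOFS =====

-- the value A's loop stores for a given path
def pvHeaderA (fullPaths : List String) (p : String) : String :=
  match pvFind fullPaths p (pvParts p) (pvLens (pvParts p)) with
  | some s => s
  | none => p

-- the (length, suffix) keys one path contributes to B's counter
def pvKeys (q : String) : List (Int × String) :=
  (pvLens (pvParts q)).map (fun L => (L, pvSuffix (pvParts q) L))

-- "q collides with suffix s at length L"
def pvCond (L : Int) (s : String) (q : String) : Bool :=
  decide (L ≤ ((pvParts q).length : Int) ∧ pvSuffix (pvParts q) L = s)

lemma pv_keys_insert {κ ν : Type} [BEq κ] [LawfulBEq κ] (d : PySem.Dict κ ν) (k : κ) (v : ν) :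
    (d.insert k v).keys = if d.contains k then d.keys else d.keys ++ [k] := by
  by_cases h : d.contains k = true
  · simp only [PySem.Dict.insert, PySem.Dict.keys, h, if_true]
    rw [List.map_map]
    apply List.map_congr_left
    intro p _
    by_cases hpk : (p.1 == k) = true
    · simp [Function.comp, hpk, (eq_of_beq hpk).symm]
    · simp [Function.comp, hpk]
  · simp [PySem.Dict.insert, PySem.Dict.keys, h]

lemma pv_map_insert_eq {κ ν : Type} [BEq κ] [LawfulBEq κ] :
    ∀ (items : List (κ × ν)) (k : κ) (v : ν), (items.map Prod.fst).Nodup →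
      (PySem.Dict.mk items).get? k = some v →
      items.map (fun p => if p.1 == k then (k, v) else p) = items := by
  intro items
  induction items with
  | nil => intro k v _ h; simp [PySem.Dict.get?] at h
  | cons a t ih =>
    obtain ⟨a1, a2⟩ := a
    intro k v hnd hget
    rw [PySem.Dict.get?_mk_cons] at hget
    simp only [List.map_cons, List.nodup_cons] at hnd
    by_cases h : (a1 == k) = true
    · have hak : a1 = k := eq_of_beq h
      simp only [h, if_true] at hget
      have hv : a2 = v := by simpa using hget
      have ht : t.map (fun p => if p.1 == k then (k, v) else p) = t := by
        conv_rhs => rw [← List.map_id t]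
        apply List.map_congr_left
        intro p hp
        have hpf : (p.1 == k) = false := by
          apply beq_eq_false_iff_ne.mpr
          intro hpk
          exact hnd.1 (by rw [hak, ← hpk]; exact List.mem_map_of_mem hp)
        simp [hpf]
      rw [List.map_cons, ht]
      simp [← hak, ← hv]
    · have h' : (a1 == k) = false := by simpa using h
      simp only [h', Bool.false_eq_true, if_false] at hget
      simp only [List.map_cons, h', Bool.false_eq_true, if_false]
      rw [ih k v hnd.2 hget]

lemma pv_insert_self {κ ν : Type} [BEq κ] [LawfulBEq κ] (d : PySem.Dict κ ν) (k : κ) (v : ν)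
    (hnd : d.keys.Nodup) (h : d.get? k = some v) : d.insert k v = d := by
  have hc : d.contains k = true := by
    cases hcb : d.contains k
    · rw [(PySem.Dict.get?_eq_none_iff_contains d k).mpr hcb] at h; exact absurd h (by simp)
    · rfl
  obtain ⟨items⟩ := d
  simp only [PySem.Dict.insert, hc, if_true]
  congr 1
  exact pv_map_insert_eq items k v hnd h

lemma pv_get?_foldl_insert {κ ν : Type} [BEq κ] [LawfulBEq κ] (f : κ → ν) :
    ∀ (l : List κ) (d : PySem.Dict κ ν) (k : κ),
      (l.foldl (fun h p => h.insert p (f p)) d).get? k =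
        if k ∈ l then some (f k) else d.get? k := by
  intro l
  induction l with
  | nil => simp
  | cons a t ih =>
    intro d k
    simp only [List.foldl_cons, ih, List.mem_cons]
    by_cases hkt : k ∈ t
    · simp [hkt]
    · by_cases hka : k = a
      · subst hka; simp [hkt, PySem.Dict.get?_insert_self]
      · simp [hkt, hka, PySem.Dict.get?_insert_of_ne _ _ hka]

lemma pv_items_eq_keys_map {κ ν : Type} [BEq κ] [LawfulBEq κ] (f : κ → ν) :
    ∀ (items : List (κ × ν)), (items.map Prod.fst).Nodup →
      (∀ k ∈ items.map Prod.fst, (PySem.Dict.mk items).get? k = some (f k)) →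
      items = (items.map Prod.fst).map (fun k => (k, f k)) := by
  intro items
  induction items with
  | nil => simp
  | cons a t ih =>
    obtain ⟨a1, a2⟩ := a
    intro hnd hall
    simp only [List.map_cons, List.nodup_cons] at hnd ⊢
    have ha : (PySem.Dict.mk ((a1, a2) :: t)).get? a1 = some (f a1) :=
      hall a1 (by simp)
    rw [PySem.Dict.get?_mk_cons] at ha
    simp only [beq_self_eq_true, if_true] at ha
    have hv : a2 = f a1 := by simpa using ha
    have ht : t = (t.map Prod.fst).map (fun k => (k, f k)) := by
      apply ih hnd.2
      intro k hk
      have hka : (a1 == k) = false :=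
        beq_eq_false_iff_ne.mpr (fun he => hnd.1 (he ▸ hk))
      have hh := hall k (by simp [hk])
      rw [PySem.Dict.get?_mk_cons, hka] at hh
      simpa using hh
    rw [hv, ← ht]

lemma pv_items_foldl_insert (f : String → String) (l : List String) :
    (l.foldl (fun h p => h.insert p (f p)) PySem.Dict.empty).items =
      (PySem.List.dedup l).map (fun k => (k, f k)) := by
  have hkeys : (l.foldl (fun h p => h.insert p (f p)) PySem.Dict.empty).keys
      = PySem.List.dedup l := by
    have hk := PySem.Dict.keys_foldl_insert l (fun _ x => f x) (PySem.Dict.empty (ν := String))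
    simpa [PySem.Dict.empty, PySem.Dict.keys, PySem.Set.update, PySem.List.dedup,
      PySem.Set.ofList, PySem.Set.empty] using hk
  set d := l.foldl (fun h p => h.insert p (f p)) PySem.Dict.empty with hd
  have hnd : d.keys.Nodup := hkeys ▸ PySem.List.nodup_dedup l
  have hall : ∀ k ∈ d.keys, d.get? k = some (f k) := by
    intro k hk
    rw [hkeys] at hk
    rw [hd, pv_get?_foldl_insert, if_pos ((PySem.List.mem_dedup l k).mp hk)]
  have hfin := pv_items_eq_keys_map f d.items hnd (by simpa [PySem.Dict.keys] using hall)
  rw [show d.items.map Prod.fst = d.keys from rfl, hkeys] at hfin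
  exact hfin

lemma pv_foldA_eq (fullPaths : List String) :
    ∀ (l : List String) (d : PySem.Dict String String), d.keys.Nodup →
      (∀ k v, d.get? k = some v → v = pvHeaderA fullPaths k) →
      l.foldl (pvAStep fullPaths) d =
        l.foldl (fun h p => h.insert p (pvHeaderA fullPaths p)) d := by
  intro l
  induction l with
  | nil => intro d _ _; rfl
  | cons p t ih =>
    intro d hnd hinv
    simp only [List.foldl_cons]
    have hstep : pvAStep fullPaths d p = d.insert p (pvHeaderA fullPaths p) := by
      cases hf : pvFind fullPaths p (pvParts p) (pvLens (pvParts p)) with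
      | some s =>
        have hA : pvAStep fullPaths d p
            = if (d.insert p s).contains p = true then d.insert p s
              else (d.insert p s).insert p p := by
          simp only [pvAStep]; rw [hf]
        have hH : pvHeaderA fullPaths p = s := by
          simp only [pvHeaderA]; rw [hf]
        rw [hA, hH, if_pos (by rw [PySem.Dict.contains_insert]; simp)]
      | none =>
        have hA : pvAStep fullPaths d p = if d.contains p = true then d
              else d.insert p p := by
          simp only [pvAStep]; rw [hf]
        have hH : pvHeaderA fullPaths p = p := by
          simp only [pvHeaderA]; rw [hf]
        rw [hA, hH]
        cases hc : d.contains p with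
        | true =>
          rw [if_pos rfl]
          obtain ⟨v, hv⟩ : ∃ v, d.get? p = some v := by
            cases hgp : d.get? p with
            | none =>
              exact absurd ((PySem.Dict.get?_eq_none_iff_contains d p).mp hgp)
                (by simp [hc])
            | some v => exact ⟨v, rfl⟩
          have hvp : v = p := by
            have h2 := hinv p v hv
            rwa [hH] at h2
          exact (pv_insert_self d p p hnd (hvp ▸ hv)).symm
        | false => rw [if_neg (by simp)]
    rw [hstep]
    apply ih
    · rw [pv_keys_insert]
      cases hc : d.contains p with
      | true => simpa using hnd
      | false =>
        simp only [Bool.false_eq_true, if_false]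
        have hnm : p ∉ d.keys := fun hm =>
          by simp [(PySem.Dict.contains_iff_mem_keys d p).mpr hm] at hc
        have hne : ∀ a ∈ d.keys, ¬a = p := fun a ha hap => hnm (hap ▸ ha)
        simpa [List.nodup_append, hnd] using hne
    · intro k v hget
      by_cases hk : k = p
      · subst hk
        rw [PySem.Dict.get?_insert_self] at hget
        injection hget with hh; exact hh.symm
      · rw [PySem.Dict.get?_insert_of_ne _ _ hk] at hget
        exact hinv k v hget

lemma pv_conflict_eq_any (p : String) (L : Int) (s : String) :
    ∀ (paths : List String), pvConflict paths p L s
      = paths.any (fun o => (!(o == p)) && pvCond L s o) := by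
  intro paths
  induction paths with
  | nil => rfl
  | cons o rest ih =>
    rw [List.any_cons]
    by_cases ho : (o == p) = true
    · have hL : pvConflict (o :: rest) p L s = pvConflict rest p L s := by
        simp [pvConflict, ho]
      rw [hL, ih, ho]
      simp
    · have ho' : (o == p) = false := by simpa using ho
      by_cases hlen : L ≤ ((pvParts o).length : Int)
      · by_cases hs : (pvSuffix (pvParts o) L == s) = true
        · have hcond : pvCond L s o = true := by
            simp [pvCond, hlen, eq_of_beq hs]
          have hLHS : pvConflict (o :: rest) p L s = true := by
            simp [pvConflict, ho', hlen, hs]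
          rw [hLHS, ho', hcond]
          simp
        · have hs' : (pvSuffix (pvParts o) L == s) = false := by simpa using hs
          have hcond : pvCond L s o = false := by
            simp [pvCond, beq_eq_false_iff_ne.mp hs']
          have hLHS : pvConflict (o :: rest) p L s = pvConflict rest p L s := by
            simp [pvConflict, ho', hlen, hs']
          rw [hLHS, ih, ho', hcond]
          simp
      · have hcond : pvCond L s o = false := by
          simp [pvCond, hlen]
        have hLHS : pvConflict (o :: rest) p L s = pvConflict rest p L s := by
          simp [pvConflict, ho', hlen]
        rw [hLHS, ih, ho', hcond]
        simp

lemma pv_conflict_true_iff (paths : List String) (p : String) (L : Int) (s : String) :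
    pvConflict paths p L s = true ↔ ∃ o ∈ paths, o ≠ p ∧ pvCond L s o = true := by
  rw [pv_conflict_eq_any p L s paths, List.any_eq_true]
  constructor
  · rintro ⟨o, ho, hpred⟩
    rw [Bool.and_eq_true, Bool.not_eq_true'] at hpred
    exact ⟨o, ho, beq_eq_false_iff_ne.mp hpred.1, hpred.2⟩
  · rintro ⟨o, ho, hne, hc⟩
    refine ⟨o, ho, ?_⟩
    rw [Bool.and_eq_true, Bool.not_eq_true']
    exact ⟨beq_eq_false_iff_ne.mpr hne, hc⟩

lemma pv_nodup_pvLens (parts : List String) : (pvLens parts).Nodup := by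
  unfold pvLens PySem.List.pyRange
  simp only [if_neg (by norm_num : ¬((1 : Int) = 0))]
  apply List.Nodup.map
  · intro a b hab
    simpa using hab
  · exact List.nodup_range

lemma pv_countP_single {α : Type} [DecidableEq α] (x : α) (p : α → Bool)
    (hp : ∀ a, p a = true → a = x) :
    ∀ (l : List α), l.Nodup →
      l.countP p = if x ∈ l ∧ p x = true then 1 else 0 := by
  intro l
  induction l with
  | nil => simp
  | cons a t ih =>
    intro hnd
    rw [List.nodup_cons] at hnd
    rw [List.countP_cons]
    by_cases ha : p a = true
    · have hax : a = x := hp a ha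
      subst hax
      have ht : t.countP p = 0 := by
        apply List.countP_eq_zero.mpr
        intro b hb hpb
        exact hnd.1 ((hp b hpb) ▸ hb)
      simp [ht, ha]
    · rw [if_neg ha, add_zero, ih hnd.2]
      by_cases hx : x ∈ t ∧ p x = true
      · rw [if_pos hx, if_pos ⟨List.mem_cons_of_mem _ hx.1, hx.2⟩]
      · have hx2 : ¬(x ∈ a :: t ∧ p x = true) := by
          rintro ⟨hm, hpx⟩
          rcases List.mem_cons.mp hm with h | h
          · exact ha (h ▸ hpx)
          · exact hx ⟨h, hpx⟩
        rw [if_neg hx, if_neg hx2]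

lemma pv_count_map_pair (L : Int) (s : String) (lens : List Int)
    (f : Int → (Int × String)) :
    (lens.map f).count (L, s) = lens.countP (fun a => f a == (L, s)) := by
  induction lens with
  | nil => simp
  | cons a t ih => simp [List.count_cons, List.countP_cons, ih]

lemma pv_count_pvKeys (q : String) (L : Int) (s : String) (hL : 1 ≤ L) :
    (pvKeys q).count (L, s) = if pvCond L s q = true then 1 else 0 := by
  unfold pvKeys
  rw [pv_count_map_pair L s (pvLens (pvParts q)) (fun L => (L, pvSuffix (pvParts q) L))]
  rw [pv_countP_single L _ (fun a hab => (Prod.ext_iff.mp (beq_iff_eq.mp hab)).1)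
    (pvLens (pvParts q)) (pv_nodup_pvLens (pvParts q))]
  by_cases hc : pvCond L s q = true
  · have hcc : L ≤ ((pvParts q).length : Int) ∧ pvSuffix (pvParts q) L = s := by
      simpa [pvCond] using hc
    have hmem : L ∈ pvLens (pvParts q) := by
      unfold pvLens
      exact PySem.List.mem_pyRange_one.mpr ⟨hL, by omega⟩
    rw [if_pos ⟨hmem, beq_iff_eq.mpr (by rw [hcc.2])⟩, if_pos hc]
  · rw [if_neg hc, if_neg]
    rintro ⟨hmem, hbeq⟩
    have hsuf : pvSuffix (pvParts q) L = s := (Prod.ext_iff.mp (beq_iff_eq.mp hbeq)).2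
    unfold pvLens at hmem
    have hmem' := PySem.List.mem_pyRange_one.mp hmem
    apply hc
    have : L ≤ ((pvParts q).length : Int) ∧ pvSuffix (pvParts q) L = s :=
      ⟨by omega, hsuf⟩
    simpa [pvCond] using this

lemma pv_foldl_foldl {α β γ : Type} (g : γ → List β) (step : α → β → α) :
    ∀ (l : List γ) (init : α),
      l.foldl (fun a c => (g c).foldl step a) init = (l.flatMap g).foldl step init := by
  intro l
  induction l with
  | nil => simp
  | cons c t ih => intro init; simp [List.flatMap_cons, List.foldl_append, ih]

lemma pv_count_flatMap {α β : Type} [BEq β] (g : α → List β) (x : β) :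
    ∀ (l : List α), (l.flatMap g).count x = (l.map (fun c => (g c).count x)).sum := by
  intro l
  induction l with
  | nil => simp
  | cons c t ih => simp [List.flatMap_cons, List.count_append, ih]

lemma pv_sum_counts (L : Int) (s : String) (hL : 1 ≤ L) :
    ∀ (t : List String),
      (t.map (fun c => (pvKeys c).count (L, s))).sum = t.countP (pvCond L s) := by
  intro t
  induction t with
  | nil => simp
  | cons q t ih =>
    rw [List.map_cons, List.sum_cons, List.countP_cons, ih, pv_count_pvKeys q L s hL]
    by_cases hc : pvCond L s q = true
    · rw [if_pos hc]; omega
    · rw [if_neg hc]; omega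

lemma pv_counts_getD (distinct : List String) (L : Int) (s : String) (hL : 1 ≤ L) :
    (pvCounts distinct).getD (L, s) 0 = ((distinct.countP (pvCond L s) : Nat) : Int) := by
  have hmap : ∀ q (d : PySem.Dict (Int × String) Int),
      (pvLens (pvParts q)).foldl
        (fun d L => d.modify (L, pvSuffix (pvParts q) L) 0 (· + 1)) d =
      (pvKeys q).foldl (fun d k => d.modify k 0 (· + 1)) d := by
    intro q d
    unfold pvKeys
    rw [List.foldl_map]
  simp only [pvCounts, hmap]
  have hflat := pv_foldl_foldl (γ := String) pvKeys
    (fun (d : PySem.Dict (Int × String) Int) k => d.modify k 0 (· + 1)) distinct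
    PySem.Dict.empty
  rw [hflat, PySem.Dict.getD_foldl_modify_add_one]
  have hempty : (PySem.Dict.empty (κ := Int × String) (ν := Int)).getD (L, s) 0 = 0 := by
    simp [PySem.Dict.empty, PySem.Dict.getD, PySem.Dict.get?]
  rw [hempty, pv_count_flatMap, zero_add]
  norm_cast
  exact pv_sum_counts L s hL distinct

lemma pv_cond_self (p : String) (L : Int) (hmem : L ∈ pvLens (pvParts p)) :
    pvCond L (pvSuffix (pvParts p) L) p = true := by
  unfold pvLens at hmem
  have h := PySem.List.mem_pyRange_one.mp hmem
  have : L ≤ ((pvParts p).length : Int) ∧ pvSuffix (pvParts p) L = pvSuffix (pvParts p) L :=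
    ⟨by omega, rfl⟩
  simpa [pvCond] using this

lemma pv_conflict_iff_count (fullPaths : List String) (p : String) (hp : p ∈ fullPaths)
    (L : Int) (hmem : L ∈ pvLens (pvParts p)) :
    pvConflict fullPaths p L (pvSuffix (pvParts p) L) = false ↔
      (pvCounts (PySem.List.dedup fullPaths)).getD (L, pvSuffix (pvParts p) L) 0 = 1 := by
  have hL : 1 ≤ L := by
    unfold pvLens at hmem
    exact (PySem.List.mem_pyRange_one.mp hmem).1
  rw [pv_counts_getD (PySem.List.dedup fullPaths) L (pvSuffix (pvParts p) L) hL]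
  have hpd : p ∈ PySem.List.dedup fullPaths := (PySem.List.mem_dedup fullPaths p).mpr hp
  have hnd : (PySem.List.dedup fullPaths).Nodup := PySem.List.nodup_dedup fullPaths
  have hperm := List.perm_cons_erase hpd
  have hcnt : (PySem.List.dedup fullPaths).countP (pvCond L (pvSuffix (pvParts p) L)) =
      1 + ((PySem.List.dedup fullPaths).erase p).countP (pvCond L (pvSuffix (pvParts p) L)) := by
    rw [hperm.countP_eq, List.countP_cons]
    simp [pv_cond_self p L hmem]
    omega
  constructor
  · intro hcf
    have hzero : ((PySem.List.dedup fullPaths).erase p).countP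
        (pvCond L (pvSuffix (pvParts p) L)) = 0 := by
      apply List.countP_eq_zero.mpr
      intro q hq hcq
      have hq' := hnd.mem_erase_iff.mp hq
      have hct := (pv_conflict_true_iff fullPaths p L (pvSuffix (pvParts p) L)).mpr
        ⟨q, (PySem.List.mem_dedup fullPaths q).mp hq'.2, hq'.1, hcq⟩
      rw [hcf] at hct
      exact absurd hct (by simp)
    rw [hcnt, hzero]
    norm_num
  · intro hone
    have h1 : (PySem.List.dedup fullPaths).countP (pvCond L (pvSuffix (pvParts p) L)) = 1 := by
      exact_mod_cast hone
    have hzero : ((PySem.List.dedup fullPaths).erase p).countP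
        (pvCond L (pvSuffix (pvParts p) L)) = 0 := by omega
    cases hcf : pvConflict fullPaths p L (pvSuffix (pvParts p) L) with
    | false => rfl
    | true =>
      obtain ⟨o, ho, hop, hco⟩ :=
        (pv_conflict_true_iff fullPaths p L (pvSuffix (pvParts p) L)).mp hcf
      have hoe : o ∈ (PySem.List.dedup fullPaths).erase p :=
        hnd.mem_erase_iff.mpr ⟨hop, (PySem.List.mem_dedup fullPaths o).mpr ho⟩
      exact absurd hco (List.countP_eq_zero.mp hzero o hoe)

lemma pv_find_eq_pick (fullPaths : List String) (p : String) (hp : p ∈ fullPaths) :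
    ∀ (Ls : List Int), (∀ L ∈ Ls, L ∈ pvLens (pvParts p)) →
      (match pvFind fullPaths p (pvParts p) Ls with
        | some s => s
        | none => p) =
      pvPick (pvCounts (PySem.List.dedup fullPaths)) (pvParts p) p Ls := by
  intro Ls
  induction Ls with
  | nil => intro _; rfl
  | cons L rest ih =>
    intro hall
    have hmem : L ∈ pvLens (pvParts p) := hall L (by simp)
    simp only [pvFind, pvPick]
    cases hcf : pvConflict fullPaths p L (pvSuffix (pvParts p) L) with
    | false =>
      have hone := (pv_conflict_iff_count fullPaths p hp L hmem).mp hcf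
      rw [if_neg (by simp), if_pos (beq_iff_eq.mpr hone)]
    | true =>
      have hne : ¬((pvCounts (PySem.List.dedup fullPaths)).getD
          (L, pvSuffix (pvParts p) L) 0 == 1) = true := by
        intro h
        have hcf2 := (pv_conflict_iff_count fullPaths p hp L hmem).mpr (beq_iff_eq.mp h)
        rw [hcf2] at hcf
        exact absurd hcf (by simp)
      rw [if_pos rfl, if_neg hne]
      exact ih (fun L' hL' => hall L' (List.mem_cons_of_mem _ hL'))

lemma pv_headerA_eq (fullPaths : List String) (p : String) (hp : p ∈ fullPaths) :
    pvHeaderA fullPaths p =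
      pvPick (pvCounts (PySem.List.dedup fullPaths)) (pvParts p) p (pvLens (pvParts p)) := by
  rw [pvHeaderA]
  exact pv_find_eq_pick fullPaths p hp (pvLens (pvParts p)) (fun _ h => h)

lemma pv_dedup_idem (l : List String) :
    PySem.List.dedup (PySem.List.dedup l) = PySem.List.dedup l := by
  have h := PySem.Set.update_eq_append_of_disjoint (PySem.Set.empty (α := String))
    (PySem.List.dedup l) (PySem.List.nodup_dedup l) (by intro x _ hx; simp [PySem.Set.empty] at hx)
  simpa [PySem.List.dedup, PySem.Set.ofList, PySem.Set.update, PySem.Set.empty] using h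

-- ===== VERDICT (by name: the statement is the Claim_ definition above) =====
theorem get_unique_headers_spec : Claim_equal_get_unique_headers := by
  unfold Claim_equal_get_unique_headers Spec_get_unique_headers
  intro fullPaths _
  rw [get_unique_headers]
  simp only [get_unique_headers_alt]
  rw [pv_foldA_eq fullPaths fullPaths PySem.Dict.empty
    (by simp [PySem.Dict.empty, PySem.Dict.keys])
    (by intro k v h; simp [PySem.Dict.empty, PySem.Dict.get?] at h)]
  rw [pv_items_foldl_insert (pvHeaderA fullPaths) fullPaths]
  rw [pv_items_foldl_insert
    (fun p => pvPick (pvCounts (PySem.List.dedup fullPaths)) (pvParts p) p (pvLens (pvParts p)))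
    (PySem.List.dedup fullPaths)]
  rw [pv_dedup_idem]
  apply List.map_congr_left
  intro p hp
  rw [pv_headerA_eq fullPaths p ((PySem.List.mem_dedup fullPaths p).mp hp)]
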